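-- pv_equiv track=rewrite | github.com/tenpy/tenpy | tenpy/tools/misc.py | transpose_list_list
-- ===== SOURCE A (Python) =====
-- def transpose_list_list(D, pad=None):
--     """Returns a list of lists T, such that ``T[i][j] = D[j][i]``.
--
--     Parameters
--     ----------
--     D : list of list
--         to be transposed
--     pad :
--         Used to fill missing places, if D is not rectangular.
--
--     Returns
--     -------
--     T : list of lists
--         transposed, rectangular version of `D`.
--         constructed such that ``T[i][j] = D[j][i] if i < len(D[j]) else pad``
--     """
--     nRow = len(D)
--     if nRow == 0:
--         return [[]]
--     nCol = max([len(R) for R in D])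
--     T = [[pad] * nRow for i in range(nCol)]
--     for j, R in enumerate(D):
--         for i, e in enumerate(R):
--             T[i][j] = e
--     return T
-- ===== SOURCE B (Python) =====
-- def transpose_list_list(D, pad=None):
--     if len(D) == 0:
--         return [[]]
--     nCol = max(len(R) for R in D)
--     return [[R[i] if i < len(R) else pad for R in D] for i in range(nCol)]
-- ===== Notes on version B (the rewrite author's own statement) =====
-- stated objective: simpler
-- what changed: Instead of prefilling an nCol x nRow rectangle of pad and scattering every present element into it with indexed writes, B builds each transposed row directly as a comprehension gathering cell j of every source row with an explicit bounds check.
import Mathlib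
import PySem

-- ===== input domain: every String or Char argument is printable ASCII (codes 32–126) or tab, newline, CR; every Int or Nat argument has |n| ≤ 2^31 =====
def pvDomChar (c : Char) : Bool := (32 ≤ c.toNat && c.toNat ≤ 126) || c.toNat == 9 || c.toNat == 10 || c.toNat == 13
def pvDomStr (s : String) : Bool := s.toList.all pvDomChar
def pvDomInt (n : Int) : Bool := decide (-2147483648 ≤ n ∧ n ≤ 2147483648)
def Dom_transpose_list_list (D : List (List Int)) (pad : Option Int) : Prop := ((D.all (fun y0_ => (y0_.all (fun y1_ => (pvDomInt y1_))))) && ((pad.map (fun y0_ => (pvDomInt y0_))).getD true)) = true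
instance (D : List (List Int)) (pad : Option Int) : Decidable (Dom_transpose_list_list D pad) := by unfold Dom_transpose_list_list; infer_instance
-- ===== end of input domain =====

-- B replaces A's prefill-a-pad-rectangle-then-scatter strategy by directly gathering each
-- transposed row across the source rows with a bounds check (objective: simpler).

-- ===== PORT A =====
-- literal transliteration of A: guard nRow == 0, nCol = max of row lengths,
-- prefill T with pad, then scatter every element with indexed writes T[i][j] = e
def transpose_list_list (D : List (List Int)) (pad : Option Int) : List (List (Option Int)) :=
  let nRow := D.length
  if nRow = 0 then [[]]
  else
    let nCol := (D.map (fun R => R.length)).max?.getD 0   -- max([...]) of a nonempty list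
    let T0 : List (List (Option Int)) := (List.range nCol).map (fun _ => List.replicate nRow pad)
    D.zipIdx.foldl
      (fun T jR => jR.1.zipIdx.foldl
        (fun T ie => T.modify ie.2 (fun row => row.set jR.2 (some ie.1))) T) T0

-- ===== PORT B =====
-- literal transliteration of B: per-output-row gather with an explicit bounds check
def transpose_list_list_alt (D : List (List Int)) (pad : Option Int) : List (List (Option Int)) :=
  if D.length = 0 then [[]]
  else
    let nCol := (D.map (fun R => R.length)).max?.getD 0
    (List.range nCol).map (fun i => D.map (fun R => if h : i < R.length then some R[i] else pad))

-- ===== PRECONDITION & SPEC =====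
def Spec_transpose_list_list (D : List (List Int)) (pad : Option Int) (out : List (List (Option Int))) : Prop := out = transpose_list_list_alt D pad
instance (D : List (List Int)) (pad : Option Int) (out : List (List (Option Int))) : Decidable (Spec_transpose_list_list D pad out) := by unfold Spec_transpose_list_list; infer_instance

-- ===== CLAIM (what is proved, stated in full; the proofs are below) =====
def Claim_equal_transpose_list_list : Prop := ∀ (D : List (List Int)) (pad : Option Int), Dom_transpose_list_list D pad → Spec_transpose_list_list D pad (transpose_list_list D pad)

-- ===== LEMMAS AND PROOFS =====

-- "set column j to v if v is present" — the net effect of A's writes on one row of T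
def pvMaybeSet (j : Nat) (o : Option Int) (row : List (Option Int)) : List (Option Int) :=
  match o with
  | some v => row.set j (some v)
  | none => row

theorem pvMaybeSet_length (j : Nat) (o : Option Int) (row : List (Option Int)) :
    (pvMaybeSet j o row).length = row.length := by
  cases o <;> simp [pvMaybeSet]

theorem pvMaybeSet_getElem?_ne (j i : Nat) (o : Option Int) (row : List (Option Int))
    (h : i ≠ j) : (pvMaybeSet j o row)[i]? = row[i]? := by
  cases o <;> simp [pvMaybeSet, Ne.symm h]

theorem pvMaybeSet_getElem?_self (j : Nat) (o : Option Int) (row : List (Option Int)) :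
    (pvMaybeSet j o row)[j]? =
      match o with
      | some v => if j < row.length then some (some v) else none
      | none => row[j]? := by
  cases o <;> simp [pvMaybeSet, List.getElem?_set]

theorem pvMaybeSet_getElem?_self_comm (n j : Nat) (h : n ≠ j) (o c : Option Int)
    (row : List (Option Int)) :
    (pvMaybeSet j c (pvMaybeSet n o row))[j]? = (pvMaybeSet j c row)[j]? := by
  cases c with
  | none => exact pvMaybeSet_getElem?_ne n j o row (Ne.symm h)
  | some v => rw [pvMaybeSet_getElem?_self, pvMaybeSet_getElem?_self, pvMaybeSet_length]

-- A's inner loop (scatter one source row R into column j), characterised row-wise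
theorem pvInner_get (R : List Int) : ∀ (m : Nat) (T : List (List (Option Int))) (j k : Nat),
    ((R.zipIdx m).foldl (fun T ie => T.modify ie.2 (fun row => row.set j (some ie.1))) T)[k]? =
      T[k]?.map (pvMaybeSet j (if m ≤ k then R[k - m]? else none)) := by
  induction R with
  | nil =>
    intro m T j k
    cases h : T[k]? <;> simp [pvMaybeSet, h]
  | cons e R ih =>
    intro m T j k
    rw [show (e :: R).zipIdx m = (e, m) :: R.zipIdx (m + 1) from by simp [List.zipIdx]]
    rw [List.foldl_cons, ih (m + 1)]
    rcases Nat.lt_trichotomy m k with hmk | hmk | hmk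
    · rw [List.getElem?_modify]
      have h1 : ¬ m = k := by omega
      have h2 : m ≤ k := by omega
      have h3 : m + 1 ≤ k := by omega
      have h4 : (e :: R)[k - m]? = R[k - (m + 1)]? := by
        rw [show k - m = (k - (m + 1)) + 1 by omega]
        simp
      simp [h1, h2, h3, h4]
    · subst hmk
      rw [List.getElem?_modify]
      have h3 : ¬ m + 1 ≤ m := by omega
      simp only [h3, if_false]
      cases T[m]? <;> simp [pvMaybeSet]
    · rw [List.getElem?_modify]
      have h1 : ¬ m = k := by omega
      have h2 : ¬ m ≤ k := by omega
      have h3 : ¬ m + 1 ≤ k := by omega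
      simp [h1, h2, h3]

-- A's outer loop, characterised cell-wise: cell (k, j) of the scattered T
theorem pvOuter_cell (D : List (List Int)) : ∀ (n : Nat) (T : List (List (Option Int))) (k j : Nat),
    ((D.zipIdx n).foldl
        (fun T jR => jR.1.zipIdx.foldl
          (fun T ie => T.modify ie.2 (fun row => row.set jR.2 (some ie.1))) T) T)[k]?.map
        (fun row => row[j]?) =
      T[k]?.map (fun row =>
        (pvMaybeSet j (if n ≤ j then (D[j - n]?.bind (fun R => R[k]?)) else none) row)[j]?) := by
  induction D with
  | nil =>
    intro n T k j
    cases h : T[k]? with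
    | none => simp [h]
    | some row =>
      by_cases hnj : n ≤ j <;> simp [h, hnj, pvMaybeSet]
  | cons R D ih =>
    intro n T k j
    rw [show (R :: D).zipIdx n = (R, n) :: D.zipIdx (n + 1) from by simp [List.zipIdx]]
    rw [List.foldl_cons, ih (n + 1), pvInner_get R 0]
    cases h : T[k]? with
    | none => simp
    | some row =>
      have hR : (if 0 ≤ k then R[k - 0]? else none) = R[k]? := by simp
      simp only [hR, Option.map_some]
      congr 1
      rcases Nat.lt_trichotomy n j with hnj | hnj | hnj
      · -- n < j: column j is written (if at all) by a later source row
        have h1 : n ≤ j := by omega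
        have h2 : n + 1 ≤ j := by omega
        have h3 : (R :: D)[j - n]? = D[j - (n + 1)]? := by
          rw [show j - n = (j - (n + 1)) + 1 by omega]; simp
        rw [if_pos h1, if_pos h2, h3]
        exact pvMaybeSet_getElem?_self_comm n j (by omega) R[k]? _ row
      · -- j = n: exactly the inner write of source row R
        subst hnj
        have h2 : ¬ n + 1 ≤ n := by omega
        rw [if_neg h2, if_pos (Nat.le_refl n)]
        simp [pvMaybeSet]
      · -- j < n: no source row writes column j
        have h1 : ¬ n ≤ j := by omega
        have h2 : ¬ n + 1 ≤ j := by omega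
        rw [if_neg h1, if_neg h2]
        exact pvMaybeSet_getElem?_self_comm n j (by omega) R[k]? none row

-- the scatter loops never change the number of rows of T
theorem pvInner_length (L : List (Int × Nat)) (j : Nat) :
    ∀ (T : List (List (Option Int))),
    (L.foldl (fun T ie => T.modify ie.2 (fun row => row.set j (some ie.1))) T).length = T.length := by
  induction L with
  | nil => intro T; rfl
  | cons p L ih => intro T; rw [List.foldl_cons, ih]; simp

theorem pvOuter_length (L : List (List Int × Nat)) :
    ∀ (T : List (List (Option Int))),
    ((L.foldl
        (fun T jR => jR.1.zipIdx.foldl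
          (fun T ie => T.modify ie.2 (fun row => row.set jR.2 (some ie.1))) T) T)).length = T.length := by
  induction L with
  | nil => intro T; rfl
  | cons p L ih => intro T; rw [List.foldl_cons, ih, pvInner_length]

-- ===== VERDICT (by name: the statement is the Claim_ definition above) =====
theorem transpose_list_list_spec : Claim_equal_transpose_list_list := by
  intro D pad _
  unfold Spec_transpose_list_list transpose_list_list transpose_list_list_alt
  by_cases hD : D.length = 0
  · simp [hD]
  · simp only [hD, if_false]
    set nCol := (D.map (fun R => R.length)).max?.getD 0 with hnCol
    set T0 : List (List (Option Int)) := (List.range nCol).map (fun _ => List.replicate D.length pad) with hT0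
    apply List.ext_getElem?
    intro k
    have hlen : ((D.zipIdx).foldl
        (fun T jR => jR.1.zipIdx.foldl
          (fun T ie => T.modify ie.2 (fun row => row.set jR.2 (some ie.1))) T) T0).length = nCol := by
      rw [pvOuter_length]; simp [hT0]
    by_cases hk : k < nCol
    · -- both sides are `some row`; compare the rows cell by cell
      have hcell := pvOuter_cell D 0 T0 k
      have hT0k : T0[k]? = some (List.replicate D.length pad) := by
        simp [hT0, hk]
      obtain ⟨rowA, hrowA⟩ : ∃ r, _[k]? = some r :=
        ⟨_, List.getElem?_eq_getElem (by rw [hlen]; exact hk)⟩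
      rw [hrowA]
      rw [List.getElem?_map, List.getElem?_range hk]
      simp only [Option.map_some]
      congr 1
      apply List.ext_getElem?
      intro j
      have := hcell j
      rw [hrowA, hT0k] at this
      simp only [Option.map_some, Option.some.injEq, Nat.zero_le, if_pos, Nat.sub_zero] at this
      rw [this, List.getElem?_map]
      cases hDj : D[j]? with
      | none =>
        have hj : D.length ≤ j := List.getElem?_eq_none_iff.mp hDj
        simp [pvMaybeSet, List.getElem?_replicate]
        omega
      | some R =>
        obtain ⟨hj, -⟩ := List.getElem?_eq_some_iff.mp hDj
        simp only [Option.bind_some, Option.map_some]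
        cases hRk : R[k]? with
        | none =>
          have hkR : R.length ≤ k := List.getElem?_eq_none_iff.mp hRk
          rw [pvMaybeSet_getElem?_self]
          simp [hj]
          intro h'
          exact absurd h' (by omega)
        | some v =>
          obtain ⟨hkR, hv⟩ := List.getElem?_eq_some_iff.mp hRk
          rw [pvMaybeSet_getElem?_self]
          simp [hj, hkR, hv]
    · -- past nCol: both sides are none
      rw [List.getElem?_eq_none_iff.mpr (by rw [hlen]; omega),
          List.getElem?_eq_none_iff.mpr (by simp; omega)]
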